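-- pv_equiv track=rewrite | github.com/t0r1n88/Lachesis | mental_state/shmelev_osr_razuvaeva.py | calc_value_m
-- ===== SOURCE A (Python) =====
-- def calc_value_m(row):
--     """
--     Функция для подсчета значения
--     :return: число
--     """
--     lst_pr = [4,16]
--     value_forward = 0  # результат
--     for idx, value in enumerate(row,1):
--         if idx in lst_pr:
--             if value == 1:
--                 value_forward += 1
--
--     return value_forward
-- ===== SOURCE B (Python) =====
-- def calc_value_m(row):
--     """
--     Функция для подсчета значения
--     :return: число
--     """
--     return sum(1 for i in (3, 15) if i < len(row) and row[i] == 1)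
-- ===== Notes on version B (the rewrite author's own statement) =====
-- stated objective: faster
-- what changed: Replaces the whole-row enumerate scan with membership tests by two direct bounds-checked index accesses at the only relevant positions 3 and 15.
import Mathlib
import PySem

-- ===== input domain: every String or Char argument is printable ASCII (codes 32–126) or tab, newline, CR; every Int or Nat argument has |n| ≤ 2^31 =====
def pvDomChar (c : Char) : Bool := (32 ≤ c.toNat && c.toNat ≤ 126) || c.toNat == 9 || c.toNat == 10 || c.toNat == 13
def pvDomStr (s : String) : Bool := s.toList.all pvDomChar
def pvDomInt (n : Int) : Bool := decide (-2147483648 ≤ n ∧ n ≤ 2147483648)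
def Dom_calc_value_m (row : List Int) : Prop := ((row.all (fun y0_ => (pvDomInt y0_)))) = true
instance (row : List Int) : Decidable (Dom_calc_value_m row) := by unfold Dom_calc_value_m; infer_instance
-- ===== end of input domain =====

-- B reads only the two relevant positions 3 and 15 directly (bounds-checked) instead of scanning the whole row: O(1) instead of O(n), measured faster in a timing run.


-- ===== PORT A =====
-- for idx, value in enumerate(row, 1): if idx in [4,16]: if value == 1: value_forward += 1
def calc_value_m (row : List Int) : Int :=
  (PySem.List.enumerate row 1).foldl
    (fun value_forward p =>
      if p.1 ∈ ([4, 16] : List Int) then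
        (if p.2 = 1 then value_forward + 1 else value_forward)
      else value_forward) 0

-- ===== PORT B =====
-- sum(1 for i in (3, 15) if i < len(row) and row[i] == 1)
def calc_value_m_alt (row : List Int) : Int :=
  ([3, 15] : List Int).foldl
    (fun acc i =>
      if i < (row.length : Int) ∧ PySem.List.pyGet? row i = some 1 then acc + 1 else acc) 0

-- ===== PRECONDITION & SPEC =====
def Spec_calc_value_m (row : List Int) (out : Int) : Prop := out = calc_value_m_alt row
instance (row : List Int) (out : Int) : Decidable (Spec_calc_value_m row out) := by unfold Spec_calc_value_m; infer_instance

-- ===== CLAIM (what is proved, stated in full; the proofs are below) =====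
def Claim_equal_calc_value_m : Prop := ∀ (row : List Int), Dom_calc_value_m row → Spec_calc_value_m row (calc_value_m row)

-- ===== LEMMAS AND PROOFS =====

-- indicator: 1 if position k (an Int) of row holds value 1, else 0 (negative k counts as out of range)
def pvHit (row : List Int) (k : Int) : Int :=
  if 0 ≤ k ∧ row[k.toNat]? = some 1 then 1 else 0

theorem pvHit_neg (row : List Int) (k : Int) (hk : k < 0) : pvHit row k = 0 := by
  simp [pvHit]; omega

theorem pvHit_cons (x : Int) (xs : List Int) (k : Int) :
    pvHit (x :: xs) k = (if k = 0 ∧ x = 1 then 1 else 0) + pvHit xs (k - 1) := by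
  rcases lt_trichotomy k 0 with h | h | h
  · rw [pvHit_neg _ _ h, pvHit_neg _ _ (by omega)]
    simp; omega
  · subst h; simp [pvHit]
  · obtain ⟨n, rfl⟩ : ∃ n : ℕ, k = (n : Int) + 1 := ⟨(k - 1).toNat, by omega⟩
    have h1 : ((n : Int) + 1).toNat = n + 1 := by omega
    have h2 : ((n : Int) + 1 - 1).toNat = n := by omega
    simp only [pvHit, h1, h2, List.getElem?_cons_succ]
    have hne : ¬ ((n : Int) + 1 = 0) := by omega
    simp [hne]
    split_ifs with a b
    all_goals simp_all
    all_goals omega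

-- the remainder of A's loop, starting at 1-based index s
def pvC (row : List Int) (s : Int) : Int :=
  match row with
  | [] => 0
  | x :: xs => (if (s = 4 ∨ s = 16) ∧ x = 1 then 1 else 0) + pvC xs (s + 1)

theorem foldA_eq_pvC (row : List Int) : ∀ (s acc : Int),
    (PySem.List.enumerate row s).foldl
      (fun value_forward p =>
        if p.1 ∈ ([4, 16] : List Int) then
          (if p.2 = 1 then value_forward + 1 else value_forward)
        else value_forward) acc = acc + pvC row s := by
  induction row with
  | nil => intro s acc; simp [PySem.List.enumerate_nil, pvC]
  | cons x xs ih =>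
    intro s acc
    rw [PySem.List.enumerate_cons, List.foldl_cons, ih, pvC]
    simp only [List.mem_cons, List.not_mem_nil, or_false]
    split_ifs <;> omega

theorem pvC_eq (row : List Int) : ∀ (s : Int),
    pvC row s = pvHit row (4 - s) + pvHit row (16 - s) := by
  induction row with
  | nil => intro s; simp [pvC, pvHit]
  | cons x xs ih =>
    intro s
    rw [pvC, ih, pvHit_cons, pvHit_cons]
    have h4 : (4 : Int) - s - 1 = 4 - (s + 1) := by ring
    have h16 : (16 : Int) - s - 1 = 16 - (s + 1) := by ring
    rw [h4, h16]
    split_ifs <;> omega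

theorem alt_eq (row : List Int) :
    calc_value_m_alt row = pvHit row 3 + pvHit row 15 := by
  unfold calc_value_m_alt pvHit
  have g3 : PySem.List.pyGet? row 3 = row[(3 : Nat)]? := by
    simpa using PySem.List.pyGet?_natCast (xs := row) (n := 3)
  have g15 : PySem.List.pyGet? row 15 = row[(15 : Nat)]? := by
    simpa using PySem.List.pyGet?_natCast (xs := row) (n := 15)
  have l3 : ((3 : Int) < (row.length : Int) ∧ row[(3:Nat)]? = some 1) ↔ row[(3:Nat)]? = some 1 := by
    constructor
    · rintro ⟨_, h⟩; exact h
    · intro h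
      have := List.getElem?_eq_some_iff.mp h
      exact ⟨by exact_mod_cast this.1, h⟩
  have l15 : ((15 : Int) < (row.length : Int) ∧ row[(15:Nat)]? = some 1) ↔ row[(15:Nat)]? = some 1 := by
    constructor
    · rintro ⟨_, h⟩; exact h
    · intro h
      have := List.getElem?_eq_some_iff.mp h
      exact ⟨by exact_mod_cast this.1, h⟩
  simp only [List.foldl_cons, g3, g15, l3, l15]
  split_ifs <;> simp_all

-- ===== VERDICT (by name: the statement is the Claim_ definition above) =====
theorem calc_value_m_spec : Claim_equal_calc_value_m := by
  intro row _
  show calc_value_m row = calc_value_m_alt row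
  rw [calc_value_m, foldA_eq_pvC, pvC_eq, alt_eq]
  norm_num
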